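-- pv_equiv track=rewrite | github.com/yaniv-golan/asr-bias-builder | asr_bias_builder/mining/seeds.py | build_contexts
-- ===== SOURCE A (Python) =====
-- from collections import Counter, defaultdict
-- from typing import Dict, Iterable, List, Optional
--
-- MAX_CONTEXT_CHARS = 80
--
-- def build_contexts(text: str, terms: Iterable[str]) -> Dict[str, List[str]]:
--     contexts: Dict[str, List[str]] = defaultdict(list)
--     lowered = text.lower()
--     for term in terms:
--         term_clean = term.strip()
--         if not term_clean:
--             continue
--         idx = lowered.find(term_clean.lower())
--         if idx == -1:
--             continue
--         start = max(0, idx - MAX_CONTEXT_CHARS // 2)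
--         end = min(len(text), idx + len(term_clean) + MAX_CONTEXT_CHARS // 2)
--         snippet = text[start:end].replace("\n", " ")
--         contexts[term_clean].append(snippet.strip())
--     return contexts
-- ===== SOURCE B (Python) =====
-- def build_contexts(text, terms):
--     # Single left-to-right scan over the text finds the leftmost occurrence of every
--     # distinct (stripped, lowered) term at once; snippets are then assembled per term.
--     lowered = text.lower()
--     cleaned = [t for t in (term.strip() for term in terms) if t]
--     pending = list(dict.fromkeys(t.lower() for t in cleaned))
--     found = {}
--     i = 0
--     n = len(lowered)
--     while pending and i < n:
--         still = []
--         for p in pending: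
--             if lowered.startswith(p, i):
--                 found[p] = i
--             else:
--                 still.append(p)
--         pending = still
--         i += 1
--     out = {}
--     for t in cleaned:
--         idx = found.get(t.lower())
--         if idx is None:
--             continue
--         start = max(0, idx - 40)
--         end = min(len(text), idx + len(t) + 40)
--         snippet = text[start:end].replace("\n", " ")
--         out.setdefault(t, []).append(snippet.strip())
--     return out
-- ===== Notes on version B (the rewrite author's own statement) =====
-- stated objective: alternative
-- what changed: A calls str.find on the whole text once per term; B instead makes a single left-to-right pass over the text recording the leftmost occurrence of every distinct (stripped, lowered) term simultaneously, dropping a term from the pending set once found, then assembles the snippets from that one-pass index; the pass trades per-term C-level find scans for one shared Python-level scan, so it is not reliably faster in CPython.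
import Mathlib
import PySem

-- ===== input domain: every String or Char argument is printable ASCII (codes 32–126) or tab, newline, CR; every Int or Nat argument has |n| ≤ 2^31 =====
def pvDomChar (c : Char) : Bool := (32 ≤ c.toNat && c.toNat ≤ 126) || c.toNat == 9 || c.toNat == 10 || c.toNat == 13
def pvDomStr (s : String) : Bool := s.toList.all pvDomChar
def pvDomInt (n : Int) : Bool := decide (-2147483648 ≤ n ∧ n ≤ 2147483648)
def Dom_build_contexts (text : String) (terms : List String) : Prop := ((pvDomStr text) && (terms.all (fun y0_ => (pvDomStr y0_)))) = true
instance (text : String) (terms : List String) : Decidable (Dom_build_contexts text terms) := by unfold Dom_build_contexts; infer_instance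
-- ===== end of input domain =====

-- B replaces A's per-term full-text `find` scans by ONE left-to-right scan of the text that
-- records the leftmost occurrence of every distinct (stripped, lowered) term simultaneously.

-- ===== PORT A =====
def build_contexts (text : String) (terms : List String) : List (String × List String) :=
  let lowered := PySem.Chars.lower text.toList
  let d := terms.foldl (fun (d : PySem.Dict String (List String)) term =>
    let term_clean := PySem.Chars.strip term.toList
    if term_clean = [] then d
    else
      let idx := PySem.Chars.find lowered (PySem.Chars.lower term_clean)
      if idx = -1 then d
      else
        let start := max 0 (idx - PySem.Int.floordiv 80 2)
        let stop := min ((text.toList.length : Int)) (idx + (term_clean.length : Int) + PySem.Int.floordiv 80 2)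
        let snippet := PySem.Chars.replace (PySem.List.slice text.toList (some start) (some stop)) ['\n'] [' ']
        d.modify (String.ofList term_clean) [] (· ++ [String.ofList (PySem.Chars.strip snippet)])
    ) PySem.Dict.empty
  d.items

-- ===== PORT B =====
-- the inner `for p in pending` loop of Source B (one position i of the scan)
def bcStep (suffix : List Char) (i : Nat) (pending : List (List Char))
    (found : PySem.Dict (List Char) Nat) :
    PySem.Dict (List Char) Nat × List (List Char) :=
  pending.foldl (fun acc p =>
      if PySem.Chars.startswith suffix p then (acc.1.insert p i, acc.2)
      else (acc.1, acc.2 ++ [p]))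
    (found, ([] : List (List Char)))

-- the `while pending and i < n` loop of Source B; `suffix` is lowered[i:]
def bcScan : List Char → Nat → List (List Char) → PySem.Dict (List Char) Nat →
    PySem.Dict (List Char) Nat
  | [], _, _, found => found
  | c :: rest, i, pending, found =>
    if pending.isEmpty then found
    else
      let st := bcStep (c :: rest) i pending found
      bcScan rest (i + 1) st.2 st.1

def build_contexts_alt (text : String) (terms : List String) : List (String × List String) :=
  let lowered := PySem.Chars.lower text.toList
  let cleaned := terms.filterMap (fun term =>
    let t := PySem.Chars.strip term.toList
    if t = [] then none else some t)
  let pending := PySem.List.dedup (cleaned.map PySem.Chars.lower)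
  let found := bcScan lowered 0 pending PySem.Dict.empty
  let d := cleaned.foldl (fun (d : PySem.Dict String (List String)) t =>
    match found.get? (PySem.Chars.lower t) with
    | none => d
    | some idx =>
      let start := max 0 ((idx : Int) - 40)
      let stop := min ((text.toList.length : Int)) ((idx : Int) + (t.length : Int) + 40)
      let snippet := PySem.Chars.replace (PySem.List.slice text.toList (some start) (some stop)) ['\n'] [' ']
      d.modify (String.ofList t) [] (· ++ [String.ofList (PySem.Chars.strip snippet)])
    ) PySem.Dict.empty
  d.items

-- ===== PRECONDITION & SPEC =====
def Spec_build_contexts (text : String) (terms : List String) (out : List (String × List String)) : Prop := out = build_contexts_alt text terms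
instance (text : String) (terms : List String) (out : List (String × List String)) : Decidable (Spec_build_contexts text terms out) := by unfold Spec_build_contexts; infer_instance

-- ===== CLAIM (what is proved, stated in full; the proofs are below) =====
def Claim_equal_build_contexts : Prop := ∀ (text : String) (terms : List String), Dom_build_contexts text terms → Spec_build_contexts text terms (build_contexts text terms)

-- ===== LEMMAS AND PROOFS =====

-- position of the first occurrence of p in s (none if absent); reference for the scan
def firstMatch : List Char → List Char → Option Nat
  | [], _ => none
  | c :: rest, p => if p <+: (c :: rest) then some 0 else (firstMatch rest p).map (· + 1)

theorem firstMatch_none_iff (s p : List Char) (hp : p ≠ []) :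
    firstMatch s p = none ↔ ∀ j, ¬ p <+: s.drop j := by
  induction s with
  | nil =>
    simp [firstMatch, List.prefix_nil, hp]
  | cons c rest ih =>
    by_cases h : p <+: (c :: rest)
    · constructor
      · intro hnone; simp [firstMatch, h] at hnone
      · intro hall; exact absurd h (by simpa using hall 0)
    · simp only [firstMatch, if_neg h, Option.map_eq_none_iff, ih]
      constructor
      · intro hall j
        cases j with
        | zero => simpa using h
        | succ j => simpa using hall j
      · intro hall j; simpa using hall (j + 1)

theorem firstMatch_some (s p : List Char) (j : Nat) (h : firstMatch s p = some j) :
    p <+: s.drop j ∧ ∀ i < j, ¬ p <+: s.drop i := by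
  induction s generalizing j with
  | nil => simp [firstMatch] at h
  | cons c rest ih =>
    by_cases hpre : p <+: (c :: rest)
    · simp [firstMatch, hpre] at h
      subst h
      exact ⟨hpre, by omega⟩
    · simp only [firstMatch, if_neg hpre, Option.map_eq_some_iff] at h
      obtain ⟨j', hj', rfl⟩ := h
      obtain ⟨h1, h2⟩ := ih j' hj'
      refine ⟨by simpa using h1, ?_⟩
      intro i hi
      cases i with
      | zero => simpa using hpre
      | succ i => simpa using h2 i (by omega)

theorem firstMatch_eq_find (s p : List Char) (hp : p ≠ []) :
    firstMatch s p =
      if 0 ≤ PySem.Chars.find s p then some (PySem.Chars.find s p).toNat else none := by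
  by_cases hocc : ∃ j, p <+: s.drop j
  · have hin : PySem.Chars.isIn p s = true :=
      (PySem.Chars.exists_prefix_drop_iff_isIn p s).mp hocc
    have hinf : p <:+: s := (PySem.Chars.isIn_iff_infix p s).mp hin
    have hfind : 0 ≤ PySem.Chars.find s p := (PySem.Chars.find_nonneg_iff s p).mpr hinf
    obtain ⟨hpre, hmin⟩ := PySem.Chars.find_spec hfind
    rw [if_pos hfind]
    cases hfm : firstMatch s p with
    | none =>
      exact absurd ((firstMatch_none_iff s p hp).mp hfm (PySem.Chars.find s p).toNat) (by simpa using hpre)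
    | some j =>
      obtain ⟨h1, h2⟩ := firstMatch_some s p j hfm
      congr 1
      by_contra hne
      rcases Nat.lt_or_ge j (PySem.Chars.find s p).toNat with hlt | hge
      · exact hmin j hlt h1
      · exact h2 _ (by omega) hpre
  · have hnin : PySem.Chars.isIn p s = false := by
      cases hii : PySem.Chars.isIn p s
      · rfl
      · exact absurd ((PySem.Chars.exists_prefix_drop_iff_isIn p s).mpr hii) hocc
    have hninf : ¬ p <:+: s := (PySem.Chars.isIn_eq_false_iff p s).mp hnin
    have hneg : ¬ 0 ≤ PySem.Chars.find s p := fun h =>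
      hninf ((PySem.Chars.find_nonneg_iff s p).mp h)
    rw [if_neg hneg]
    exact (firstMatch_none_iff s p hp).mpr (fun j hj => hocc ⟨j, hj⟩)

theorem get?_foldl_insert_const (hits : List (List Char)) (i : Nat) :
    ∀ (d : PySem.Dict (List Char) Nat) (q : List Char),
      (hits.foldl (fun d p => d.insert p i) d).get? q
        = if q ∈ hits then some i else d.get? q := by
  induction hits with
  | nil => simp
  | cons h t ih =>
    intro d q
    rw [List.foldl_cons, ih]
    by_cases hq : q ∈ t
    · simp [hq]
    · rw [PySem.Dict.get?_insert]
      simp [hq, List.mem_cons]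

theorem bcStep_eq (suffix : List Char) (i : Nat) :
    ∀ (pending : List (List Char)) (found : PySem.Dict (List Char) Nat)
      (acc : List (List Char)),
      pending.foldl (fun acc p =>
          if PySem.Chars.startswith suffix p then (acc.1.insert p i, acc.2)
          else (acc.1, acc.2 ++ [p])) (found, acc)
        = ((pending.filter (fun p => PySem.Chars.startswith suffix p)).foldl
             (fun d p => d.insert p i) found,
           acc ++ pending.filter (fun p => !PySem.Chars.startswith suffix p)) := by
  intro pending
  induction pending with
  | nil => simp
  | cons h t ih =>
    intro found acc
    cases hs : PySem.Chars.startswith suffix h <;> simp [List.foldl_cons, hs, ih]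

theorem bcScan_get? (suffix : List Char) :
    ∀ (i : Nat) (pending : List (List Char)) (found : PySem.Dict (List Char) Nat),
      (∀ p ∈ pending, found.get? p = none) →
      ∀ q, (bcScan suffix i pending found).get? q
        = if q ∈ pending then (firstMatch suffix q).map (· + i) else found.get? q := by
  induction suffix with
  | nil =>
    intro i pending found hnone q
    by_cases hq : q ∈ pending
    · simp [bcScan, firstMatch, hq, hnone q hq]
    · simp [bcScan, hq]
  | cons c rest ih =>
    intro i pending found hnone q
    by_cases hemp : pending.isEmpty
    · have : pending = [] := List.isEmpty_iff.mp hemp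
      subst this
      simp [bcScan]
    · rw [show bcScan (c :: rest) i pending found
            = bcScan rest (i + 1) (bcStep (c :: rest) i pending found).2
                (bcStep (c :: rest) i pending found).1 by
          simp [bcScan, hemp]]
      rw [show bcStep (c :: rest) i pending found
            = ((pending.filter (fun p => PySem.Chars.startswith (c :: rest) p)).foldl
                 (fun d p => d.insert p i) found,
               pending.filter (fun p => !PySem.Chars.startswith (c :: rest) p)) from
          bcStep_eq (c :: rest) i pending found []]
      have hfound' : ∀ p ∈ pending.filter (fun p => !PySem.Chars.startswith (c :: rest) p),
          ((pending.filter (fun p => PySem.Chars.startswith (c :: rest) p)).foldl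
             (fun d p => d.insert p i) found).get? p = none := by
        intro p hp
        rw [get?_foldl_insert_const]
        simp only [List.mem_filter, Bool.not_eq_eq_eq_not, Bool.not_true] at hp
        rw [if_neg (by simp [List.mem_filter, hp.2]), hnone p hp.1]
      rw [ih (i + 1) _ _ hfound' q]
      by_cases hq : q ∈ pending
      · cases hs : PySem.Chars.startswith (c :: rest) q
        · -- no match at this position: q stays pending
          have hpre : ¬ q <+: (c :: rest) := by
            intro h; rw [(PySem.Chars.startswith_iff _ _).mpr h] at hs; exact absurd hs (by simp)
          rw [if_pos (by simp [List.mem_filter, hq, hs]), if_pos hq]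
          simp only [firstMatch, if_neg hpre, Option.map_map]
          cases firstMatch rest q with
          | none => rfl
          | some v => simp; omega
        · -- match: q is recorded at i
          have hpre : q <+: (c :: rest) := (PySem.Chars.startswith_iff _ _).mp hs
          rw [if_neg (by simp [List.mem_filter, hs]), get?_foldl_insert_const,
            if_pos (by simp [List.mem_filter, hq, hs]), if_pos hq]
          simp [firstMatch, hpre]
      · rw [if_neg (by simp [List.mem_filter, hq]), get?_foldl_insert_const,
          if_neg (by simp [List.mem_filter, hq]), if_neg hq]

theorem lower_ne_nil (t : List Char) (ht : t ≠ []) : PySem.Chars.lower t ≠ [] := by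
  cases t with
  | nil => exact absurd rfl ht
  | cons c rest => simp [PySem.Chars.lower]

-- the two per-term loops agree, given that `found` answers exactly like `find`
theorem folds_eq (text : String) (lowered : List Char)
    (found : PySem.Dict (List Char) Nat) :
    ∀ (terms : List String) (d : PySem.Dict String (List String)),
      (∀ term ∈ terms, ∀ t, t = PySem.Chars.strip term.toList → t ≠ [] →
        found.get? (PySem.Chars.lower t)
          = if 0 ≤ PySem.Chars.find lowered (PySem.Chars.lower t)
            then some (PySem.Chars.find lowered (PySem.Chars.lower t)).toNat else none) →
      terms.foldl (fun (d : PySem.Dict String (List String)) term =>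
        let term_clean := PySem.Chars.strip term.toList
        if term_clean = [] then d
        else
          let idx := PySem.Chars.find lowered (PySem.Chars.lower term_clean)
          if idx = -1 then d
          else
            let start := max 0 (idx - PySem.Int.floordiv 80 2)
            let stop := min ((text.toList.length : Int)) (idx + (term_clean.length : Int) + PySem.Int.floordiv 80 2)
            let snippet := PySem.Chars.replace (PySem.List.slice text.toList (some start) (some stop)) ['\n'] [' ']
            d.modify (String.ofList term_clean) [] (· ++ [String.ofList (PySem.Chars.strip snippet)])) d
      = (terms.filterMap (fun term =>
          let t := PySem.Chars.strip term.toList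
          if t = [] then none else some t)).foldl
          (fun (d : PySem.Dict String (List String)) t =>
            match found.get? (PySem.Chars.lower t) with
            | none => d
            | some idx =>
              let start := max 0 ((idx : Int) - 40)
              let stop := min ((text.toList.length : Int)) ((idx : Int) + (t.length : Int) + 40)
              let snippet := PySem.Chars.replace (PySem.List.slice text.toList (some start) (some stop)) ['\n'] [' ']
              d.modify (String.ofList t) [] (· ++ [String.ofList (PySem.Chars.strip snippet)])) d := by
  intro terms
  induction terms with
  | nil => intro d _; rfl
  | cons term rest ih =>
    intro d hfound
    by_cases hempty : PySem.Chars.strip term.toList = []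
    · simp only [List.foldl_cons, List.filterMap_cons, hempty, reduceIte]
      exact ih d (fun u hu => hfound u (List.mem_cons_of_mem _ hu))
    · have hfd := hfound term (List.mem_cons_self) _ rfl hempty
      by_cases hmiss : PySem.Chars.find lowered (PySem.Chars.lower (PySem.Chars.strip term.toList)) = -1
      · have hneg : ¬ 0 ≤ PySem.Chars.find lowered (PySem.Chars.lower (PySem.Chars.strip term.toList)) := by
          omega
        simp only [List.foldl_cons, List.filterMap_cons, if_neg hempty, hfd, if_neg hneg,
          if_pos hmiss]
        exact ih d (fun u hu => hfound u (List.mem_cons_of_mem _ hu))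
      · have hge : 0 ≤ PySem.Chars.find lowered (PySem.Chars.lower (PySem.Chars.strip term.toList)) := by
          have := PySem.Chars.neg_one_le_find lowered (PySem.Chars.lower (PySem.Chars.strip term.toList))
          omega
        simp only [List.foldl_cons, List.filterMap_cons, if_neg hempty, hfd, if_pos hge,
          if_neg hmiss, Int.toNat_of_nonneg hge,
          show PySem.Int.floordiv 80 2 = (40 : Int) from by decide]
        exact ih _ (fun u hu => hfound u (List.mem_cons_of_mem _ hu))

-- ===== VERDICT (by name: the statement is the Claim_ definition above) =====
theorem build_contexts_spec : Claim_equal_build_contexts := by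
  intro text terms _
  unfold Spec_build_contexts build_contexts build_contexts_alt
  simp only []
  congr 1
  apply folds_eq
  intro term hterm t ht htne
  rw [bcScan_get? (PySem.Chars.lower text.toList) 0 _ PySem.Dict.empty
      (by intro p _; exact PySem.Dict.get?_empty p)]
  have hmem : PySem.Chars.lower t ∈
      PySem.List.dedup ((terms.filterMap (fun term =>
        let t := PySem.Chars.strip term.toList
        if t = [] then none else some t)).map PySem.Chars.lower) := by
    rw [PySem.List.mem_dedup]
    exact List.mem_map_of_mem (by
      rw [List.mem_filterMap]
      exact ⟨term, hterm, by rw [← ht]; simp [htne]⟩)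
  rw [if_pos hmem, firstMatch_eq_find _ _ (lower_ne_nil t htne)]
  by_cases hge : 0 ≤ PySem.Chars.find (PySem.Chars.lower text.toList) (PySem.Chars.lower t) <;>
    simp [hge]
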